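-- pv_equiv track=rewrite | github.com/MecEE14/TIL | SWEA/정답/5986. 새샘이와 세 소수.py | three
-- ===== SOURCE A (Python) =====
-- def three(ls):                      # 부분 집합 중 원소 3개인 것
--     ln = len(ls)
--     nnls = []
--     for i in range(1<<ln):
--         nls = []
--         for j in range(ln):
--             if i & (1<<j):
--                 nls += [ls[j]]
--         if len(nls) == 3:
--             nnls += [nls]
--     return nnls
-- ===== SOURCE B (Python) =====
-- def three(ls):                      # 부분 집합 중 원소 3개인 것
--     n = len(ls)
--     # i < j < k index triples, ordered by (k, j, i) = increasing bitmask value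
--     return [[ls[i], ls[j], ls[k]]
--             for k in range(n) for j in range(k) for i in range(j)]
-- ===== Notes on version B (the rewrite author's own statement) =====
-- stated objective: faster
-- what changed: Replaced the scan over all 2^n bitmasks (rebuilding a sublist per mask and keeping the length-3 ones) with a direct triple loop over index triples i<j<k, nested as (k,j,i) so the output order equals the increasing-bitmask order.
import Mathlib
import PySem

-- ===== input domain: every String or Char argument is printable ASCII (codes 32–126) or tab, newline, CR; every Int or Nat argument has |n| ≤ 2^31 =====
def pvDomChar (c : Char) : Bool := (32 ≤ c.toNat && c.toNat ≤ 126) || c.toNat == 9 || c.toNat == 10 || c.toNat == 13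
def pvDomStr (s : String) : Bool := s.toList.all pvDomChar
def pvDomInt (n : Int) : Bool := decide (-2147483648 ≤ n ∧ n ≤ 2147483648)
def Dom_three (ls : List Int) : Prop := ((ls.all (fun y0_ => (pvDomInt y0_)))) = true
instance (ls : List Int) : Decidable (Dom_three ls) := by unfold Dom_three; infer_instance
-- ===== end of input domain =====

-- B enumerates the index triples i<j<k directly (O(n^3)) instead of scanning all 2^n bitmasks; same output order.

-- ===== PORT A =====
-- inner loop of A: collect ls[j] for every bit j set in mask i.
-- Exact: the masks i are the nonnegative values of range(1<<n), so Python's `i & (1<<j)`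
-- nonzero test is Nat.testBit; j always indexes in range, so getD's default is never used.
def threeBits (ls : List Int) (i : Nat) : List Int :=
  (List.range ls.length).foldl
    (fun nls j => if i.testBit j then nls ++ [ls.getD j 0] else nls) []

def three (ls : List Int) : List (List Int) :=
  (List.range (2 ^ ls.length)).foldl
    (fun nnls i =>
      let nls := threeBits ls i
      if nls.length = 3 then nnls ++ [nls] else nnls) []

-- ===== PORT B =====
-- B: [[ls[i], ls[j], ls[k]] for k in range(n) for j in range(k) for i in range(j)]
def three_alt (ls : List Int) : List (List Int) :=
  (List.range ls.length).flatMap fun k =>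
    (List.range k).flatMap fun j =>
      (List.range j).map fun i => [ls.getD i 0, ls.getD j 0, ls.getD k 0]

-- ===== PRECONDITION & SPEC =====
def Spec_three (ls : List Int) (out : List (List Int)) : Prop := out = three_alt ls
instance (ls : List Int) (out : List (List Int)) : Decidable (Spec_three ls out) := by unfold Spec_three; infer_instance

-- ===== CLAIM (what is proved, stated in full; the proofs are below) =====
def Claim_equal_three : Prop := ∀ (ls : List Int), Dom_three ls → Spec_three ls (three ls)

-- ===== LEMMAS AND PROOFS =====

-- A's outer loop, generalized to target subset size s
def selA (s : Nat) (ls : List Int) : List (List Int) :=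
  (List.range (2 ^ ls.length)).foldl
    (fun nnls i =>
      let nls := threeBits ls i
      if nls.length = s then nnls ++ [nls] else nnls) []

-- B's loop shape, generalized to subset sizes 0,1,2
def selB1 (ls : List Int) : List (List Int) :=
  (List.range ls.length).map fun k => [ls.getD k 0]

def selB2 (ls : List Int) : List (List Int) :=
  (List.range ls.length).flatMap fun k =>
    (List.range k).map fun j => [ls.getD j 0, ls.getD k 0]

lemma foldl_collect (f : Nat → List Int) (s : Nat) :
    ∀ (l : List Nat) (init : List (List Int)),
      l.foldl (fun acc i => let v := f i; if v.length = s then acc ++ [v] else acc) init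
        = init ++ ((l.map f).filter (fun v => decide (v.length = s))) := by
  intro l
  induction l with
  | nil => simp
  | cons a t ih =>
      intro init
      by_cases h : (f a).length = s <;> simp [List.foldl_cons, ih, h]

lemma selA_eq_filter (s : Nat) (ls : List Int) :
    selA s ls = ((List.range (2 ^ ls.length)).map (threeBits ls)).filter
        (fun v => decide (v.length = s)) := by
  simpa using foldl_collect (threeBits ls) s (List.range (2 ^ ls.length)) []

lemma getD_append_lt (ls : List Int) (x : Int) (j : Nat) (h : j < ls.length) :
    (ls ++ [x]).getD j 0 = ls.getD j 0 := by
  simp [List.getD, List.getElem?_append_left h]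

lemma bits_lt (ls : List Int) (x : Int) (i : Nat) (h : i < 2 ^ ls.length) :
    threeBits (ls ++ [x]) i = threeBits ls i := by
  unfold threeBits
  rw [List.length_append, List.length_singleton, List.range_succ, List.foldl_append]
  rw [List.foldl_cons, List.foldl_nil, Nat.testBit_lt_two_pow h, if_neg (by simp)]
  apply PySem.List.foldl_congr_mem
  intro acc j hj
  rw [getD_append_lt ls x j (List.mem_range.mp hj)]

lemma bits_hi (ls : List Int) (x : Int) (m : Nat) (h : m < 2 ^ ls.length) :
    threeBits (ls ++ [x]) (2 ^ ls.length + m) = threeBits ls m ++ [x] := by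
  unfold threeBits
  rw [List.length_append, List.length_singleton, List.range_succ, List.foldl_append]
  have hbit : (2 ^ ls.length + m).testBit ls.length = true := by
    rw [Nat.testBit_two_pow_add_eq, Nat.testBit_lt_two_pow h]; rfl
  rw [List.foldl_cons, List.foldl_nil, hbit, if_pos rfl]
  have hlast : (ls ++ [x]).getD ls.length 0 = x := by
    simp [List.getD]
  rw [hlast]
  congr 1
  apply PySem.List.foldl_congr_mem
  intro acc j hj
  rw [getD_append_lt ls x j (List.mem_range.mp hj),
      Nat.testBit_two_pow_add_gt (List.mem_range.mp hj)]

lemma map_bits_append (ls : List Int) (x : Int) :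
    (List.range (2 ^ (ls ++ [x]).length)).map (threeBits (ls ++ [x]))
      = (List.range (2 ^ ls.length)).map (threeBits ls)
        ++ ((List.range (2 ^ ls.length)).map (threeBits ls)).map (· ++ [x]) := by
  have hlen : 2 ^ (ls ++ [x]).length = 2 ^ ls.length + 2 ^ ls.length := by
    simp [pow_succ, Nat.mul_two]
  rw [hlen, List.range_add, List.map_append, List.map_map, List.map_map]
  congr 1
  · exact List.map_congr_left (fun i hi => bits_lt ls x i (List.mem_range.mp hi))
  · exact List.map_congr_left (fun m hm => bits_hi ls x m (List.mem_range.mp hm))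

lemma filter_len_succ_map (l : List (List Int)) (x : Int) (s : Nat) :
    (l.map (· ++ [x])).filter (fun v => decide (v.length = s + 1))
      = (l.filter (fun v => decide (v.length = s))).map (· ++ [x]) := by
  rw [List.filter_map,
      List.filter_congr (q := fun v => decide (v.length = s)) (fun v _ => by simp)]

lemma filter_len_zero_map (l : List (List Int)) (x : Int) :
    (l.map (· ++ [x])).filter (fun v => decide (v.length = 0)) = [] := by
  rw [List.filter_map,
      List.filter_congr (q := fun _ => false) (fun v _ => by simp), List.filter_false]
  rfl

lemma selA_succ (s : Nat) (ls : List Int) (x : Int) :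
    selA (s + 1) (ls ++ [x]) = selA (s + 1) ls ++ (selA s ls).map (· ++ [x]) := by
  rw [selA_eq_filter, selA_eq_filter, selA_eq_filter, map_bits_append,
      List.filter_append, filter_len_succ_map]

lemma selA_zero_append (ls : List Int) (x : Int) :
    selA 0 (ls ++ [x]) = selA 0 ls := by
  rw [selA_eq_filter, selA_eq_filter, map_bits_append, List.filter_append,
      filter_len_zero_map, List.append_nil]

lemma selB1_append (ls : List Int) (x : Int) :
    selB1 (ls ++ [x]) = selB1 ls ++ [[x]] := by
  unfold selB1
  rw [List.length_append, List.length_singleton, List.range_succ, List.map_append]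
  congr 1
  · exact List.map_congr_left (fun k hk =>
      by rw [getD_append_lt ls x k (List.mem_range.mp hk)])
  · simp [List.getD]

lemma selB2_append (ls : List Int) (x : Int) :
    selB2 (ls ++ [x]) = selB2 ls ++ (selB1 ls).map (· ++ [x]) := by
  unfold selB2
  rw [List.length_append, List.length_singleton, List.range_succ, List.flatMap_append]
  congr 1
  · refine List.flatMap_congr (fun k hk => List.map_congr_left (fun j hj => ?_))
    have hk' : k < ls.length := List.mem_range.mp hk
    rw [getD_append_lt ls x j (lt_trans (List.mem_range.mp hj) hk'),
        getD_append_lt ls x k hk']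
  · have hlast : (ls ++ [x]).getD ls.length 0 = x := by simp [List.getD]
    simp only [List.flatMap_cons, List.flatMap_nil, List.append_nil, hlast]
    rw [selB1, List.map_map]
    exact List.map_congr_left (fun j hj => by
      rw [getD_append_lt ls x j (List.mem_range.mp hj)]; rfl)

lemma alt_append (ls : List Int) (x : Int) :
    three_alt (ls ++ [x]) = three_alt ls ++ (selB2 ls).map (· ++ [x]) := by
  unfold three_alt
  rw [List.length_append, List.length_singleton, List.range_succ, List.flatMap_append]
  congr 1
  · refine List.flatMap_congr (fun k hk => List.flatMap_congr (fun j hj => ?_))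
    have hk' : k < ls.length := List.mem_range.mp hk
    have hj' : j < k := List.mem_range.mp hj
    exact List.map_congr_left (fun i hi => by
      rw [getD_append_lt ls x i (lt_trans (List.mem_range.mp hi) (lt_trans hj' hk')),
          getD_append_lt ls x j (lt_trans hj' hk'), getD_append_lt ls x k hk'])
  · have hlast : (ls ++ [x]).getD ls.length 0 = x := by simp [List.getD]
    simp only [List.flatMap_cons, List.flatMap_nil, List.append_nil, hlast]
    rw [selB2, List.map_flatMap]
    refine List.flatMap_congr (fun j hj => ?_)
    have hj' : j < ls.length := List.mem_range.mp hj
    rw [List.map_map]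
    exact List.map_congr_left (fun i hi => by
      rw [getD_append_lt ls x i (lt_trans (List.mem_range.mp hi) hj'),
          getD_append_lt ls x j hj']; rfl)

lemma main_conj (ls : List Int) :
    selA 0 ls = [[]] ∧ selA 1 ls = selB1 ls ∧ selA 2 ls = selB2 ls ∧
      selA 3 ls = three_alt ls := by
  induction ls using List.reverseRecOn with
  | nil => refine ⟨?_, ?_, ?_, ?_⟩ <;> decide
  | append_singleton ls x ih =>
      obtain ⟨h0, h1, h2, h3⟩ := ih
      refine ⟨?_, ?_, ?_, ?_⟩
      · rw [selA_zero_append, h0]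
      · rw [selA_succ, h0, h1, selB1_append]; rfl
      · rw [selA_succ, h1, h2, selB2_append]
      · rw [selA_succ, h2, h3, alt_append]

-- ===== VERDICT (by name: the statement is the Claim_ definition above) =====
theorem three_spec : Claim_equal_three := by
  intro ls _
  show three ls = three_alt ls
  have : three ls = selA 3 ls := rfl
  rw [this]
  exact (main_conj ls).2.2.2
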